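-- pv_equiv track=rewrite | github.com/DeveloperAcademy-POSTECH/Algorithm | TEAM B - Afternoon/Week 6/Benny/[백준-14888]연산자 끼워넣기.py | dfs
-- ===== SOURCE A (Python) =====
-- def dfs(numbers, operators, max_value, min_value):
--     if len(numbers) >= 2:
--         for i in range(4):
--             if operators[i] > 0:
--                 a = numbers.pop()
--                 b = numbers.pop()
--                 numbers.append(operate(a, b, i))
--                 operators[i] -= 1
--                 temp_max_value, temp_min_value = dfs(numbers, operators, max_value, min_value)
--                 max_value = max(max_value, temp_max_value)
--                 min_value = min(min_value, temp_min_value)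
--                 operators[i] += 1
--                 numbers.pop()
--                 numbers.append(b)
--                 numbers.append(a)
--
--         return max_value, min_value
--     else:
--         return numbers[0], numbers[0]
--
-- def operate(a, b, operator):
--     if operator == 0:
--         return a + b
--     elif operator == 1:
--         return a - b
--     elif operator == 2:
--         return a * b
--     elif a * b < 0:
--         return a // b if a % b == 0 else a // b + 1
--     else:
--         return a // b
-- ===== SOURCE B (Python) =====
-- # B: index/accumulator recursion collecting all fully-reduced values, then one
-- # max/min fold -- replaces A's stack-mutating DFS that threads max/min through
-- # recursion (simpler decomposition; A's in-place mutate-and-restore disappears).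
--
-- def operate(a, b, operator):
--     if operator == 0:
--         return a + b
--     elif operator == 1:
--         return a - b
--     elif operator == 2:
--         return a * b
--     elif a * b < 0:
--         return a // b if a % b == 0 else a // b + 1
--     else:
--         return a // b
--
--
-- def dfs(numbers, operators, max_value, min_value):
--     if len(numbers) < 2:
--         return numbers[0], numbers[0]
--
--     def go(idx, acc, c0, c1, c2, c3):
--         if idx < 0:
--             return [acc]
--         out = []
--         if c0 > 0:
--             out += go(idx - 1, operate(acc, numbers[idx], 0), c0 - 1, c1, c2, c3)
--         if c1 > 0:
--             out += go(idx - 1, operate(acc, numbers[idx], 1), c0, c1 - 1, c2, c3)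
--         if c2 > 0:
--             out += go(idx - 1, operate(acc, numbers[idx], 2), c0, c1, c2 - 1, c3)
--         if c3 > 0:
--             out += go(idx - 1, operate(acc, numbers[idx], 3), c0, c1, c2, c3 - 1)
--         return out
--
--     leaves = go(len(numbers) - 2, numbers[-1],
--                 operators[0], operators[1], operators[2], operators[3])
--     hi, lo = max_value, min_value
--     for v in leaves:
--         hi = max(hi, v)
--         lo = min(lo, v)
--     return hi, lo
-- ===== Notes on version B (the rewrite author's own statement) =====
-- stated objective: simpler
-- what changed: A's stack-mutating DFS that pops/appends on numbers and operators and threads max/min through every recursive call is replaced by a pure index/accumulator recursion over four scalar counts that collects all fully-reduced values into a list, followed by a single max/min fold.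
import Mathlib
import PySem

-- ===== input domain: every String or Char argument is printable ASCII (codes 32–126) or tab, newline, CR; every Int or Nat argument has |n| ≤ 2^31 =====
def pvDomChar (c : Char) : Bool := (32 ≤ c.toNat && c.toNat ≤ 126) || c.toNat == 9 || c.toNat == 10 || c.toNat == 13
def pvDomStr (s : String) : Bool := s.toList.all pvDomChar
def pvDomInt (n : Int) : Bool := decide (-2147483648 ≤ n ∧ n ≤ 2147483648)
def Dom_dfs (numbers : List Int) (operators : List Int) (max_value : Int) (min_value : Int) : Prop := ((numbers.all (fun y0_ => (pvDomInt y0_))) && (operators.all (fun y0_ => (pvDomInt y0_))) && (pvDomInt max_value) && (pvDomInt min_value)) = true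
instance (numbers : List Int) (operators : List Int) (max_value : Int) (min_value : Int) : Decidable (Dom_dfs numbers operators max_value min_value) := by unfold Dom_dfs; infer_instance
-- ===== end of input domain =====

-- B replaces A's stack-mutating max/min-threading DFS by an index/accumulator
-- recursion that collects all fully-reduced values and folds max/min once
-- (objective: simpler decomposition; return values proved equal on Pre_dfs).

-- ===== PORT A =====
-- operate, transliterated (Python // and % via PySem.Int.floordiv/mod).
def operateA (a : Int) (b : Int) (op : Nat) : Int :=
  if op == 0 then a + b
  else if op == 1 then a - b
  else if op == 2 then a * b
  else if a * b < 0 then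
    (if PySem.Int.mod a b == 0 then PySem.Int.floordiv a b else PySem.Int.floordiv a b + 1)
  else PySem.Int.floordiv a b

-- A's `for i in range(4)` loop, as recursion on the loop index i; the
-- pop/pop/append surgery on `numbers` becomes dropLast/dropLast/append
-- (A restores both lists before returning, so each iteration sees the same
-- lists).  The proof argument h only makes the recursion well-founded.
mutual
def dfs (numbers : List Int) (operators : List Int) (max_value : Int) (min_value : Int) : Int × Int :=
  if h : 2 ≤ numbers.length then
    dfsLoop numbers operators 0 max_value min_value h
  else
    (numbers.getD 0 0, numbers.getD 0 0)
termination_by (numbers.length, 5)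
decreasing_by
  exact Prod.Lex.right _ (by omega)

def dfsLoop (numbers : List Int) (operators : List Int) (i : Nat) (max_value : Int) (min_value : Int) (h : 2 ≤ numbers.length) : Int × Int :=
  if i < 4 then
    if operators.getD i 0 > 0 then
      let a := numbers.getLastD 0
      let b := numbers.dropLast.getLastD 0
      let numbers' := numbers.dropLast.dropLast ++ [operateA a b i]
      let operators' := operators.set i (operators.getD i 0 - 1)
      let t := dfs numbers' operators' max_value min_value
      dfsLoop numbers operators (i + 1) (max max_value t.1) (min min_value t.2) h
    else
      dfsLoop numbers operators (i + 1) max_value min_value h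
  else
    (max_value, min_value)
termination_by (numbers.length, 4 - i)
decreasing_by
  · exact Prod.Lex.left _ _ (by simp [List.length_append, List.length_dropLast]; omega)
  · exact Prod.Lex.right _ (by omega)
  · exact Prod.Lex.right _ (by omega)
end

-- ===== PORT B =====
def operateB (a : Int) (b : Int) (op : Nat) : Int :=
  if op == 0 then a + b
  else if op == 1 then a - b
  else if op == 2 then a * b
  else if a * b < 0 then
    (if PySem.Int.mod a b == 0 then PySem.Int.floordiv a b else PySem.Int.floordiv a b + 1)
  else PySem.Int.floordiv a b

-- B's `go(idx, acc, c0..c3)`: Lean argument k stands for idx+1 (k = 0 is the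
-- idx < 0 base case), so the recursion is structural on k.
def goB (numbers : List Int) : Nat → Int → Int → Int → Int → Int → List Int
  | 0, acc, _, _, _, _ => [acc]
  | k+1, acc, c0, c1, c2, c3 =>
      (if c0 > 0 then goB numbers k (operateB acc (numbers.getD k 0) 0) (c0 - 1) c1 c2 c3 else []) ++
      (if c1 > 0 then goB numbers k (operateB acc (numbers.getD k 0) 1) c0 (c1 - 1) c2 c3 else []) ++
      (if c2 > 0 then goB numbers k (operateB acc (numbers.getD k 0) 2) c0 c1 (c2 - 1) c3 else []) ++
      (if c3 > 0 then goB numbers k (operateB acc (numbers.getD k 0) 3) c0 c1 c2 (c3 - 1) else [])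

def dfs_alt (numbers : List Int) (operators : List Int) (max_value : Int) (min_value : Int) : Int × Int :=
  if numbers.length < 2 then (numbers.getD 0 0, numbers.getD 0 0)
  else
    let leaves := goB numbers (numbers.length - 1) (numbers.getLastD 0)
      (operators.getD 0 0) (operators.getD 1 0) (operators.getD 2 0) (operators.getD 3 0)
    leaves.foldl (fun p v => (max p.1 v, min p.2 v)) (max_value, min_value)

-- ===== PRECONDITION & SPEC =====
-- Pre_dfs = exactly the inputs on which Python A returns: numbers nonempty
-- (else numbers[0] raises IndexError); and when len(numbers) ≥ 2, operators
-- must have the four counts (else operators[i] raises IndexError) and no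
-- explored branch may divide by zero: a division by numbers[j] = 0 is reached
-- iff a '//' operator is available and enough operator uses remain to consume
-- the suffix after position j.
def Pre_dfs (numbers : List Int) (operators : List Int) (max_value : Int) (min_value : Int) : Prop :=
  numbers ≠ [] ∧
  (2 ≤ numbers.length →
    4 ≤ operators.length ∧
    ¬ (0 < operators.getD 3 0 ∧
        ∃ j ∈ List.range (numbers.length - 1),
          numbers.getD j 0 = 0 ∧
          (numbers.length : Int) - 1 - j ≤
            max (operators.getD 0 0) 0 + max (operators.getD 1 0) 0 +
            max (operators.getD 2 0) 0 + max (operators.getD 3 0) 0))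
instance (numbers : List Int) (operators : List Int) (max_value : Int) (min_value : Int) : Decidable (Pre_dfs numbers operators max_value min_value) := by unfold Pre_dfs; infer_instance

def pvWitness_dfs : List Int × List Int × Int × Int := ([1, 2, 3], [1, 1, 0, 0], -1000000, 1000000)

def Spec_dfs (numbers : List Int) (operators : List Int) (max_value : Int) (min_value : Int) (out : Int × Int) : Prop := out = dfs_alt numbers operators max_value min_value
instance (numbers : List Int) (operators : List Int) (max_value : Int) (min_value : Int) (out : Int × Int) : Decidable (Spec_dfs numbers operators max_value min_value out) := by unfold Spec_dfs; infer_instance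

-- ===== CLAIM (what is proved, stated in full; the proofs are below) =====
def Claim_equal_dfs : Prop := ∀ (numbers : List Int) (operators : List Int) (max_value : Int) (min_value : Int), Dom_dfs numbers operators max_value min_value → Pre_dfs numbers operators max_value min_value → Spec_dfs numbers operators max_value min_value (dfs numbers operators max_value min_value)

-- ===== LEMMAS AND PROOFS =====

theorem le_foldl_max (L : List Int) (M : Int) : M ≤ L.foldl max M := by
  induction L generalizing M with
  | nil => simp
  | cons a L ih => exact le_trans (le_max_left M a) (ih (max M a))

theorem foldl_min_le (L : List Int) (m : Int) : L.foldl min m ≤ m := by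
  induction L generalizing m with
  | nil => simp
  | cons a L ih => exact le_trans (ih (min m a)) (min_le_left m a)

-- the four counts B reads from the operator list
def cnt (ops : List Int) (i : Nat) : Int := ops.getD i 0

def Lgo (numbers : List Int) (ops : List Int) (k : Nat) (acc : Int) : List Int :=
  goB numbers k acc (cnt ops 0) (cnt ops 1) (cnt ops 2) (cnt ops 3)

theorem cnt_pos_lt (ops : List Int) (i : Nat) (h : 0 < cnt ops i) : i < ops.length := by
  by_contra hn
  simp [cnt, List.getD_eq_getElem?_getD, List.getElem?_eq_none (Nat.le_of_not_lt hn)] at h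

theorem cnt_set (ops : List Int) (i j : Nat) (x : Int) :
    cnt (ops.set i x) j = if j = i ∧ i < ops.length then x else cnt ops j := by
  simp only [cnt, List.getD_eq_getElem?_getD, List.getElem?_set]
  split_ifs with h1 h2 h3 <;> simp_all

theorem take_concat_getD (numbers : List Int) (k : Nat) (hk : k < numbers.length) :
    numbers.take (k + 1) = numbers.take k ++ [numbers.getD k 0] := by
  rw [List.take_add_one, List.getElem?_eq_getElem hk]
  simp [List.getD_eq_getElem?_getD, List.getElem?_eq_getElem hk]

theorem operate_eq : operateB = operateA := rfl

-- the list of leaves contributed by loop iteration i (empty if operator i is unavailable)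
def branchL (numbers ops : List Int) (k : Nat) (acc : Int) (i : Nat) : List Int :=
  if 0 < cnt ops i then Lgo numbers (ops.set i (cnt ops i - 1)) k (operateA acc (numbers.getD k 0) i) else []

theorem Lgo_set (numbers ops : List Int) (k : Nat) (acc x : Int) (j : Nat) (hj : j < ops.length) :
    Lgo numbers (ops.set j x) k acc =
      goB numbers k acc (if 0 = j then x else cnt ops 0) (if 1 = j then x else cnt ops 1)
        (if 2 = j then x else cnt ops 2) (if 3 = j then x else cnt ops 3) := by
  unfold Lgo
  rw [cnt_set, cnt_set, cnt_set, cnt_set]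
  simp [hj]

theorem step_lemma (numbers ops : List Int) (k i : Nat) (acc M m : Int)
    (hk : k + 1 < numbers.length) (hi : i < 4)
    (h2 : 2 ≤ (numbers.take (k + 1) ++ [acc]).length)
    (H : ∀ (ops' : List Int) (acc' M' m' : Int),
        max M' (dfs (numbers.take k ++ [acc']) ops' M' m').1 = (Lgo numbers ops' k acc').foldl max M' ∧
        min m' (dfs (numbers.take k ++ [acc']) ops' M' m').2 = (Lgo numbers ops' k acc').foldl min m') :
    dfsLoop (numbers.take (k + 1) ++ [acc]) ops i M m h2 =
      dfsLoop (numbers.take (k + 1) ++ [acc]) ops (i + 1)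
        ((branchL numbers ops k acc i).foldl max M) ((branchL numbers ops k acc i).foldl min m) h2 := by
  have etake : numbers.take (k + 1) = numbers.take k ++ [numbers.getD k 0] :=
    take_concat_getD numbers k (by omega)
  have e1 : (numbers.take (k + 1) ++ [acc]).getLastD 0 = acc := List.getLastD_concat ..
  have e2 : (numbers.take (k + 1) ++ [acc]).dropLast = numbers.take (k + 1) := List.dropLast_concat ..
  have e3 : (numbers.take (k + 1)).getLastD 0 = numbers.getD k 0 := by
    rw [etake]; exact List.getLastD_concat ..
  have e4 : (numbers.take (k + 1)).dropLast = numbers.take k := by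
    rw [etake]; exact List.dropLast_concat ..
  rw [dfsLoop]
  by_cases hc : ops.getD i 0 > 0
  · simp only [if_pos hi, if_pos hc, e1, e2, e3, e4]
    have h := H (ops.set i (ops.getD i 0 - 1)) (operateA acc (numbers.getD k 0) i) M m
    rw [h.1, h.2]
    have hb : branchL numbers ops k acc i =
        Lgo numbers (ops.set i (ops.getD i 0 - 1)) k (operateA acc (numbers.getD k 0) i) := by
      simp only [branchL, cnt]
      rw [if_pos hc]
    rw [hb]
  · simp only [if_pos hi, if_neg hc]
    have hb : branchL numbers ops k acc i = [] := by
      simp only [branchL, cnt]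
      rw [if_neg hc]
    rw [hb]
    simp

theorem branch_component (numbers ops : List Int) (k : Nat) (acc : Int) (i : Nat) (hi : i < 4) :
    (if 0 < cnt ops i then
        goB numbers k (operateB acc (numbers.getD k 0) i)
          (if 0 = i then cnt ops 0 - 1 else cnt ops 0) (if 1 = i then cnt ops 1 - 1 else cnt ops 1)
          (if 2 = i then cnt ops 2 - 1 else cnt ops 2) (if 3 = i then cnt ops 3 - 1 else cnt ops 3)
      else []) = branchL numbers ops k acc i := by
  by_cases h : 0 < cnt ops i
  · rw [if_pos h]
    unfold branchL
    rw [if_pos h, Lgo_set numbers ops k _ _ i (cnt_pos_lt ops i h), operate_eq]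
    interval_cases i <;> simp
  · rw [if_neg h]
    unfold branchL
    rw [if_neg h]

theorem main_step (numbers : List Int) (k : Nat) (ops : List Int) (acc M m : Int)
    (hk : k + 1 < numbers.length)
    (H : ∀ (ops' : List Int) (acc' M' m' : Int),
        max M' (dfs (numbers.take k ++ [acc']) ops' M' m').1 = (Lgo numbers ops' k acc').foldl max M' ∧
        min m' (dfs (numbers.take k ++ [acc']) ops' M' m').2 = (Lgo numbers ops' k acc').foldl min m') :
    dfs (numbers.take (k + 1) ++ [acc]) ops M m =
      ((Lgo numbers ops (k + 1) acc).foldl max M, (Lgo numbers ops (k + 1) acc).foldl min m) := by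
  have h2 : 2 ≤ (numbers.take (k + 1) ++ [acc]).length := by
    simp [List.length_take]
    omega
  rw [dfs, dif_pos h2]
  rw [step_lemma numbers ops k 0 acc M m hk (by omega) h2 H,
      step_lemma numbers ops k 1 acc _ _ hk (by omega) h2 H,
      step_lemma numbers ops k 2 acc _ _ hk (by omega) h2 H,
      step_lemma numbers ops k 3 acc _ _ hk (by omega) h2 H]
  rw [dfsLoop]
  simp only [show ¬ (4 < 4) by omega, if_false]
  have hsplit : Lgo numbers ops (k + 1) acc =
      branchL numbers ops k acc 0 ++ branchL numbers ops k acc 1 ++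
      branchL numbers ops k acc 2 ++ branchL numbers ops k acc 3 := by
    have c0 := branch_component numbers ops k acc 0 (by omega)
    have c1 := branch_component numbers ops k acc 1 (by omega)
    have c2 := branch_component numbers ops k acc 2 (by omega)
    have c3 := branch_component numbers ops k acc 3 (by omega)
    norm_num at c0 c1 c2 c3
    simp only [Lgo, goB, List.getD_eq_getElem?_getD]
    rw [c0, c1, c2, c3]
  rw [hsplit]
  simp [List.foldl_append]

theorem main_lemma (numbers : List Int) : ∀ (k : Nat) (ops : List Int) (acc M m : Int), k + 1 < numbers.length →
    dfs (numbers.take (k + 1) ++ [acc]) ops M m =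
      ((Lgo numbers ops (k + 1) acc).foldl max M, (Lgo numbers ops (k + 1) acc).foldl min m) := by
  intro k
  induction k with
  | zero =>
    intro ops acc M m hk
    exact main_step numbers 0 ops acc M m hk (by
      intro ops' acc' M' m'
      have hleaf : dfs (numbers.take 0 ++ [acc']) ops' M' m' = (acc', acc') := by
        rw [dfs]; simp
      rw [hleaf]
      simp [Lgo, goB])
  | succ k ih =>
    intro ops acc M m hk
    exact main_step numbers (k + 1) ops acc M m hk (by
      intro ops' acc' M' m'
      rw [ih ops' acc' M' m' (by omega)]
      constructor
      · exact max_eq_right (le_foldl_max _ _)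
      · exact min_eq_right (foldl_min_le _ _))

-- A = B on every input (the ports are total; Pre_dfs marks where Python A returns)
theorem foldl_pair (L : List Int) (M m : Int) :
    L.foldl (fun p v => (max p.1 v, min p.2 v)) (M, m) = (L.foldl max M, L.foldl min m) := by
  induction L generalizing M m with
  | nil => rfl
  | cons a L ih => simpa using ih (max M a) (min m a)

theorem ports_agree (numbers operators : List Int) (M m : Int) :
    dfs numbers operators M m = dfs_alt numbers operators M m := by
  by_cases h2 : 2 ≤ numbers.length
  · have hne : numbers ≠ [] := by intro h; subst h; simp at h2
    obtain ⟨ys, y, hys⟩ : ∃ ys y, numbers = ys ++ [y] :=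
      ⟨numbers.dropLast, numbers.getLast hne, (List.dropLast_append_getLast hne).symm⟩
    subst hys
    obtain ⟨n, hn⟩ : ∃ n, ys.length = n + 1 := ⟨ys.length - 1, by simp at h2; omega⟩
    have htake : (ys ++ [y]).take (n + 1) = ys := by
      rw [← hn]; exact List.take_left
    have hM := main_lemma (ys ++ [y]) n operators y M m (by simp; omega)
    rw [htake] at hM
    have hlast : (ys ++ [y]).getLastD 0 = y := List.getLastD_concat ..
    have hlen1 : (ys ++ [y]).length - 1 = n + 1 := by simp [hn]
    rw [hM, dfs_alt]
    rw [if_neg (by simp [hn])]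
    simp only [hlast, hlen1, foldl_pair]
    rfl
  · rw [dfs, dif_neg h2, dfs_alt, if_pos (by omega)]

-- ===== VERDICT (by name: the statement is the Claim_ definition above) =====
theorem dfs_spec : Claim_equal_dfs := by
  intro numbers operators M m _ _
  unfold Spec_dfs
  exact ports_agree numbers operators M m
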